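-- pv_equiv track=rewrite | github.com/bp274/HackerRank | Algorithms/Strings/Alternating Characters.py | alternatingCharacters
-- ===== SOURCE A (Python) =====
-- def alternatingCharacters(s):
--     i = 0
--     count = 0
--     while i < len(s) - 1:
--         if s[i] == s[i + 1]:
--             s = s[:i] + s[i + 1:]
--             count = count + 1
--             i = i - 1
--         i = i + 1
--     return count
-- ===== SOURCE B (Python) =====
-- def alternatingCharacters(s):
--     # single pass: count adjacent equal pairs
--     return sum(a == b for a, b in zip(s, s[1:]))
-- ===== Notes on version B (the rewrite author's own statement) =====
-- stated objective: faster
-- what changed: replaces the repeated-deletion while loop (rebuilding the string by slicing after each duplicate) with one linear pass counting adjacent equal character pairs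
import Mathlib
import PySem

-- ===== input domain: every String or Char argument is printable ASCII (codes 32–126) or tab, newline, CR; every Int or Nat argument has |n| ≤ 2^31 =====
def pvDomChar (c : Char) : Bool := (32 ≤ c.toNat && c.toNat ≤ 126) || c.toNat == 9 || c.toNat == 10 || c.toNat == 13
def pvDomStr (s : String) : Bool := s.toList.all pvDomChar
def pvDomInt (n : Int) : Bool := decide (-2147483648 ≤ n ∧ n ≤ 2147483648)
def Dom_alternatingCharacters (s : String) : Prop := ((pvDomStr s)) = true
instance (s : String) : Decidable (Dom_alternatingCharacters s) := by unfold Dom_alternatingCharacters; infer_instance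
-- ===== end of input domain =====

-- B changes A's quadratic delete-and-rescan loop into one linear pass over adjacent pairs; return value only, no mutation.

-- ===== PORT A =====
-- the while loop of A; `i` only ever holds nonnegative values (it starts at 0 and each
-- iteration's net change is 0 (after a deletion: i-1 then i+1) or +1), so it is a Nat here;
-- `s[:i] + s[i+1:]` for 0 ≤ i < len s is exactly `take i ++ drop (i+1)`.
def pvLoopA (cs : List Char) (i : Nat) (count : Int) : Int :=
  if h : (i : Int) < (cs.length : Int) - 1 then
    if cs[i]'(by omega) == cs[i+1]'(by omega) then
      pvLoopA (cs.take i ++ cs.drop (i+1)) i (count + 1)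
    else
      pvLoopA cs (i+1) count
  else count
termination_by 2 * cs.length - i
decreasing_by
  · simp only [List.length_append, List.length_take, List.length_drop]; omega
  · omega

def alternatingCharacters (s : String) : Int := pvLoopA s.toList 0 0

-- ===== PORT B =====
def alternatingCharacters_alt (s : String) : Int :=
  (List.zip s.toList s.toList.tail).foldl
    (fun acc p => acc + (if p.1 == p.2 then (1 : Int) else 0)) 0

-- ===== PRECONDITION & SPEC =====
def Spec_alternatingCharacters (s : String) (out : Int) : Prop := out = alternatingCharacters_alt s
instance (s : String) (out : Int) : Decidable (Spec_alternatingCharacters s out) := by unfold Spec_alternatingCharacters; infer_instance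

-- ===== CLAIM (what is proved, stated in full; the proofs are below) =====
def Claim_equal_alternatingCharacters : Prop := ∀ (s : String), Dom_alternatingCharacters s → Spec_alternatingCharacters s (alternatingCharacters s)

-- ===== LEMMAS AND PROOFS =====

-- number of adjacent equal pairs in a list
def pvPairs : List Char → Int
  | a :: b :: t => (if a == b then (1 : Int) else 0) + pvPairs (b :: t)
  | _ => 0

theorem pvPairs_nonneg : ∀ l, 0 ≤ pvPairs l
  | [] => le_refl _
  | [_] => le_refl _
  | a :: b :: t => by
      have := pvPairs_nonneg (b :: t)
      simp only [pvPairs]; split <;> omega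

theorem foldl_eq_pairs : ∀ (l : List Char) (acc : Int),
    (List.zip l l.tail).foldl (fun acc p => acc + (if p.1 == p.2 then (1 : Int) else 0)) acc
      = acc + pvPairs l
  | [], acc => by simp [pvPairs]
  | [a], acc => by simp [pvPairs]
  | a :: b :: t, acc => by
      have ih := foldl_eq_pairs (b :: t) (acc + (if a == b then (1 : Int) else 0))
      simp only [List.tail_cons, List.zip_cons_cons, List.foldl_cons] at ih ⊢
      rw [ih]; simp only [pvPairs]; ring

theorem loopA_eq : ∀ (cs : List Char) (i : Nat) (count : Int),
    pvLoopA cs i count = count + pvPairs (cs.drop i) := by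
  intro cs i count
  induction cs, i, count using pvLoopA.induct with
  | case1 cs i count h heq ih =>
      rw [pvLoopA]; simp only [h, dif_pos, heq, if_pos]
      rw [ih]
      have hi1 : i + 1 < cs.length := by omega
      have hdrop : (cs.take i ++ cs.drop (i+1)).drop i = cs.drop (i+1) := by
        have hl : (cs.take i).length = i := by simp; omega
        rw [List.drop_append]
        simp [hl]
      rw [hdrop]
      have h1 : cs.drop i = cs[i] :: cs.drop (i+1) := List.drop_eq_getElem_cons (by omega)
      have h2 : cs.drop (i+1) = cs[i+1] :: cs.drop (i+2) := List.drop_eq_getElem_cons hi1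
      rw [h1, h2, pvPairs, ← h2, heq]
      simp; ring
  | case2 cs i count h heq ih =>
      rw [pvLoopA]; simp only [h, dif_pos, heq]
      rw [ih]
      have hi1 : i + 1 < cs.length := by omega
      have h1 : cs.drop i = cs[i] :: cs.drop (i+1) := List.drop_eq_getElem_cons (by omega)
      have h2 : cs.drop (i+1) = cs[i+1] :: cs.drop (i+2) := List.drop_eq_getElem_cons hi1
      rw [h1, h2, pvPairs, ← h2]
      simp [heq]
  | case3 cs i count h =>
      rw [pvLoopA]; simp only [h]
      have : cs.drop i = [] ∨ ∃ a, cs.drop i = [a] := by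
        rcases hd : cs.drop i with _ | ⟨a, t⟩
        · exact Or.inl rfl
        · right
          have : (cs.drop i).length ≤ 1 := by simp; omega
          rw [hd] at this; simp at this
          exact ⟨a, by rw [this]⟩
      rcases this with h0 | ⟨a, h1⟩
      · simp [h0, pvPairs]
      · simp [h1, pvPairs]

-- ===== VERDICT (by name: the statement is the Claim_ definition above) =====
theorem alternatingCharacters_spec : Claim_equal_alternatingCharacters := by
  intro s _
  unfold Spec_alternatingCharacters alternatingCharacters alternatingCharacters_alt
  rw [loopA_eq, foldl_eq_pairs]
  simp
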